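-- pv_equiv track=rewrite | github.com/daljaru/CodingTest | course1/23test.py | solution
-- ===== SOURCE A (Python) =====
-- from itertools import cycle
--
-- def checkAnswer(pAnswer, answers):
--     count = 0
--     for i in range(len(pAnswer)):
--         if pAnswer[i] == answers[i]:
--             count += 1
--     return count
--
-- def solution(answers): #answer는 정답리스트
--     p1 = [1,2,3,4,5]
--     p2 = [2,1,2,3,2,4,2,5]
--     p3 = [3,3,1,1,2,2,4,4,5,5]
--
--     persons = [p1, p2, p3]
--     result = []
--     for person in persons:
--         pCycle = cycle(person)
--         pAnswer = [next(pCycle) for i in range(len(answers))]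
--         result.append(checkAnswer(pAnswer, answers))
--
--     result = [i+1 for i in range(len(result)) if result[i] == max(result)]
--     return result
-- ===== SOURCE B (Python) =====
-- def solution(answers):
--     patterns = ([1, 2, 3, 4, 5], [2, 1, 2, 3, 2, 4, 2, 5], [3, 3, 1, 1, 2, 2, 4, 4, 5, 5])
--     L = 40  # common period (lcm of 5, 8, 10)
--     groups = [[] for _ in range(L)]
--     for i, a in enumerate(answers):
--         groups[i % L].append(a)
--     scores = [sum(groups[r].count(p[r % len(p)]) for r in range(L)) for p in patterns]
--     m = max(scores)
--     return [k + 1 for k in range(3) if scores[k] == m]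
-- ===== Notes on version B (the rewrite author's own statement) =====
-- stated objective: alternative
-- what changed: B first buckets the answers by index residue mod 40 (the common period of the three patterns) in one pass, then obtains each pattern's score as a sum of 40 per-bucket count() lookups, never materialising a cycled pattern list or walking the answers per pattern; A cycles each pattern into a full length-n list and counts positionwise with a helper.
import Mathlib
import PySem

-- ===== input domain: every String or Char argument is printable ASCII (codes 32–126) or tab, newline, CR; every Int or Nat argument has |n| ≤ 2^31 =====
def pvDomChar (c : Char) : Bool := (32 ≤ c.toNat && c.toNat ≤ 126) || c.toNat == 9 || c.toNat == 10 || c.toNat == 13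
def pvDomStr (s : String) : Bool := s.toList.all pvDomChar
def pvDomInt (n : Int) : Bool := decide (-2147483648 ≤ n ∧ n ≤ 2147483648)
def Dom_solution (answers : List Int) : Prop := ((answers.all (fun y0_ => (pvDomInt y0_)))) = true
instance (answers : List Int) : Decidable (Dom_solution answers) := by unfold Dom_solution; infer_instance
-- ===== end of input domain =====

-- B buckets the answers by index residue mod 40 (the common period of the three patterns) in one
-- pass and scores each pattern by 40 per-bucket count lookups, instead of A's cycle-materialised
-- per-pattern lists with a positionwise counting helper (objective: alternative).

-- ===== PORT A =====
-- helper checkAnswer: count positions where pAnswer[i] == answers[i]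
def checkAnswer (pAnswer answers : List Int) : Int :=
  (PySem.List.pyRange 0 (pAnswer.length : Int) 1).foldl
    (fun count i =>
      if PySem.List.pyGetD pAnswer i 0 = PySem.List.pyGetD answers i 0 then count + 1 else count) 0

def solution (answers : List Int) : List Int :=
  let p1 : List Int := [1, 2, 3, 4, 5]
  let p2 : List Int := [2, 1, 2, 3, 2, 4, 2, 5]
  let p3 : List Int := [3, 3, 1, 1, 2, 2, 4, 4, 5, 5]
  let persons := [p1, p2, p3]
  let result := persons.foldl
    (fun res person =>
      -- itertools.cycle: the i-th value drawn with next() from cycle(person) is person[i % len(person)]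
      let pAnswer := (PySem.List.pyRange 0 (answers.length : Int) 1).map
        (fun i => PySem.List.pyGetD person (PySem.Int.mod i (person.length : Int)) 0)
      res ++ [checkAnswer pAnswer answers]) []
  -- [i+1 for i in range(len(result)) if result[i] == max(result)]  (result has length 3, so max never sees [])
  ((PySem.List.pyRange 0 (result.length : Int) 1).filter
    (fun i => PySem.List.pyGetD result i 0 = (PySem.List.max? result (fun y => y)).getD 0)).map
    (fun i => i + 1)

-- ===== PORT B =====
def solution_alt (answers : List Int) : List Int :=
  let p1 : List Int := [1, 2, 3, 4, 5]
  let p2 : List Int := [2, 1, 2, 3, 2, 4, 2, 5]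
  let p3 : List Int := [3, 3, 1, 1, 2, 2, 4, 4, 5, 5]
  -- groups = [[] for _ in range(40)]; groups[i % 40].append(a)
  -- (enumerate indices are ≥ 0, so 'i % 40' is the Nat value (PySem.Int.mod i 40).toNat — exact here)
  let groups := (PySem.List.enumerate answers 0).foldl
    (fun (g : List (List Int)) (ia : Int × Int) =>
      let r := (PySem.Int.mod ia.1 40).toNat
      g.set r (g.getD r [] ++ [ia.2]))
    (List.replicate 40 ([] : List Int))
  -- scores = [sum(groups[r].count(p[r % len(p)]) for r in range(40)) for p in patterns]
  -- (r and r % len(p) are always in range, so getD with a default is exact for groups[r] / p[…])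
  let scores := [p1, p2, p3].map (fun p =>
    ((List.range 40).map
      (fun r => (PySem.List.count (groups.getD r []) (p.getD (r % p.length) 0) : Int))).sum)
  let m := (PySem.List.max? scores (fun y => y)).getD 0
  ((List.range 3).filter (fun k => scores.getD k 0 = m)).map (fun k => (k : Int) + 1)

-- ===== PRECONDITION & SPEC =====
def Spec_solution (answers : List Int) (out : List Int) : Prop := out = solution_alt answers
instance (answers : List Int) (out : List Int) : Decidable (Spec_solution answers out) := by unfold Spec_solution; infer_instance

-- ===== CLAIM (what is proved, stated in full; the proofs are below) =====
def Claim_equal_solution : Prop := ∀ (answers : List Int), Dom_solution answers → Spec_solution answers (solution answers)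

-- ===== LEMMAS AND PROOFS =====

-- common reference count: matches of xs against pattern p cycled from offset i
def cnt (p : List Int) (i : Nat) : List Int → Int
  | [] => 0
  | a :: rest => (if a = p.getD (i % p.length) 0 then 1 else 0) + cnt p (i + 1) rest

theorem cnt_A (p : List Int) (xs : List Int) (i : Nat) (s : Int) :
    (List.range xs.length).foldl
      (fun c k => if p.getD ((i + k) % p.length) 0 = xs.getD k 0 then c + 1 else c) s
      = s + cnt p i xs := by
  induction xs generalizing i s with
  | nil => simp [cnt]
  | cons a rest ih =>
    simp only [List.length_cons, List.range_succ_eq_map, List.foldl_cons, List.foldl_map,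
      List.getD_cons_succ, List.getD_cons_zero, Nat.add_zero, cnt]
    have hfun : (fun (c : Int) (k : Nat) =>
        if p.getD ((i + (k + 1)) % p.length) 0 = rest.getD k 0 then c + 1 else c)
        = (fun (c : Int) (k : Nat) =>
        if p.getD (((i + 1) + k) % p.length) 0 = rest.getD k 0 then c + 1 else c) := by
      funext c k
      have h1 : i + (k + 1) = (i + 1) + k := by omega
      rw [h1]
    rw [hfun, ih (i + 1)]
    by_cases h : a = p.getD (i % p.length) 0
    · simp [h]; ring
    · rw [if_neg (fun hh => h hh.symm), if_neg h]; ring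

-- A's per-pattern pass (materialise the cycled list, then count) equals the reference count
theorem checkA (p : List Int) (xs : List Int) :
    checkAnswer
      ((PySem.List.pyRange 0 (xs.length : Int) 1).map
        (fun i => PySem.List.pyGetD p (PySem.Int.mod i (p.length : Int)) 0)) xs
      = cnt p 0 xs := by
  unfold checkAnswer
  set pA := (PySem.List.pyRange 0 (xs.length : Int) 1).map
      (fun i => PySem.List.pyGetD p (PySem.Int.mod i (p.length : Int)) 0) with hpA
  have hlen : ((pA.length : Int)) = (xs.length : Int) := by
    simp [hpA, PySem.List.length_pyRange_one]
  rw [hlen, PySem.List.pyRange_one]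
  simp only [Int.sub_zero, Int.toNat_natCast, List.foldl_map, zero_add]
  have key : ∀ (acc : Int) (k : Nat), k ∈ List.range xs.length →
      (if PySem.List.pyGetD pA (k : Int) 0 = PySem.List.pyGetD xs (k : Int) 0
        then acc + 1 else acc)
      = (if p.getD (k % p.length) 0 = xs.getD k 0 then acc + 1 else acc) := by
    intro acc k hk
    have hk' : k < xs.length := List.mem_range.mp hk
    rw [hpA, PySem.List.pyGetD_map_pyRange_of_nonneg _ _ _ _ (by positivity) (by exact_mod_cast hk')]
    simp only [PySem.Int.mod_natCast, PySem.List.pyGetD_natCast, List.getD]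
    rfl
  refine Eq.trans
    (PySem.List.foldl_congr_mem (List.range xs.length) _
      (fun (c : Int) (k : Nat) => if p.getD (k % p.length) 0 = xs.getD k 0 then c + 1 else c) 0
      (fun acc k hk => key acc k hk)) ?_
  simpa using cnt_A p xs 0 0

-- B's score of pattern p read off a bucket table g
def score (g : List (List Int)) (p : List Int) : Int :=
  ((List.range 40).map
    (fun r => (PySem.List.count (g.getD r []) (p.getD (r % p.length) 0) : Int))).sum

-- a sum over range n of a function changed at one point r < n
theorem sum_map_range_update (n r : Nat) (hr : r < n) (f f' : Nat → Int)
    (hne : ∀ k, k ≠ r → f' k = f k) :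
    ((List.range n).map f').sum = ((List.range n).map f).sum + (f' r - f r) := by
  induction n with
  | zero => omega
  | succ n ih =>
    rw [List.range_succ]
    by_cases h : r < n
    · have hn : f' n = f n := hne n (by omega)
      simp only [List.map_append, List.sum_append, List.map_cons, List.map_nil, List.sum_cons,
        List.sum_nil, hn, ih h]
      ring
    · have hrn : r = n := by omega
      subst hrn
      have : ∀ k ∈ List.range r, f' k = f k := by
        intro k hk; exact hne k (by simpa using Nat.ne_of_lt (List.mem_range.mp hk))
      simp only [List.map_append, List.sum_append, List.map_cons, List.map_nil, List.sum_cons,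
        List.sum_nil]
      rw [List.map_congr_left this]
      ring

-- appending one answer to bucket r bumps the score by 1 exactly when it matches p there
theorem score_set (g : List (List Int)) (p : List Int) (r : Nat) (hr : r < 40)
    (hg : g.length = 40) (a : Int) :
    score (g.set r (g.getD r [] ++ [a])) p
      = score g p + (if a = p.getD (r % p.length) 0 then 1 else 0) := by
  unfold score
  set v := p.getD (r % p.length) 0 with hv
  have hgr : (g.set r (g.getD r [] ++ [a])).getD r [] = g.getD r [] ++ [a] := by
    simp [List.getD_eq_getElem?_getD, List.getElem?_set_self (by omega : r < g.length)]
  have hne : ∀ k, k ≠ r →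
      ((PySem.List.count ((g.set r (g.getD r [] ++ [a])).getD k []) (p.getD (k % p.length) 0) : Int))
      = ((PySem.List.count (g.getD k []) (p.getD (k % p.length) 0) : Int)) := by
    intro k hk
    rw [List.getD_eq_getElem?_getD, List.getElem?_set_ne (Ne.symm hk), ← List.getD_eq_getElem?_getD]
  rw [sum_map_range_update 40 r hr _ _ hne, hgr]
  simp only [PySem.List.count_eq, List.count_append, List.count_singleton, ← hv]
  by_cases h : a = v <;> simp [h]

-- the bucket-building loop adds exactly the cycled-match count of the remaining answers
theorem score_loop (p : List Int) (hp : p.length ∣ 40) (xs : List Int) :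
    ∀ (i : Nat) (g : List (List Int)), g.length = 40 →
    score ((PySem.List.enumerate xs (i : Int)).foldl
      (fun (g : List (List Int)) (ia : Int × Int) =>
        let r := (PySem.Int.mod ia.1 40).toNat
        g.set r (g.getD r [] ++ [ia.2])) g) p
      = score g p + cnt p i xs := by
  induction xs with
  | nil => intro i g hg; simp [PySem.List.enumerate_nil, cnt]
  | cons a rest ih =>
    intro i g hg
    rw [PySem.List.enumerate_cons]
    simp only [List.foldl_cons]
    have hmod : (PySem.Int.mod (i : Int) 40).toNat = i % 40 := by
      rw [show ((40 : Int)) = ((40 : Nat) : Int) by norm_num, PySem.Int.mod_natCast]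
      exact Int.toNat_natCast _
    have hcast : ((i : Int) + 1) = ((i + 1 : Nat) : Int) := by push_cast; ring
    rw [hmod, hcast, ih (i + 1) _ (by simp [hg])]
    rw [score_set g p (i % 40) (Nat.mod_lt _ (by norm_num)) hg a]
    rw [Nat.mod_mod_of_dvd i hp]
    simp [cnt]
    ring

theorem score_empty (p : List Int) : score (List.replicate 40 ([] : List Int)) p = 0 := by
  unfold score
  have : ∀ r ∈ List.range 40,
      ((PySem.List.count ((List.replicate 40 ([] : List Int)).getD r []) (p.getD (r % p.length) 0) : Int))
      = (fun _ : Nat => (0 : Int)) r := by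
    intro r hr
    have : (List.replicate 40 ([] : List Int)).getD r [] = [] := by
      rw [List.getD_eq_getElem?_getD, List.getElem?_replicate_of_lt (List.mem_range.mp hr)]
      rfl
    rw [this]
    simp [PySem.List.count_eq]
  rw [List.map_congr_left this]
  simp

-- the final selection stage: identical for any triple of scores
theorem final_eq (s1 s2 s3 : Int) :
    (((PySem.List.pyRange 0 (([s1, s2, s3] : List Int).length : Int) 1).filter
        (fun i => PySem.List.pyGetD [s1, s2, s3] i 0
          = (PySem.List.max? [s1, s2, s3] (fun y => y)).getD 0)).map (fun i => i + 1))
    = ((List.range 3).filter (fun k => ([s1, s2, s3] : List Int).getD k 0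
          = (PySem.List.max? [s1, s2, s3] (fun y => y)).getD 0)).map (fun k => (k : Int) + 1) := by
  set m := (PySem.List.max? [s1, s2, s3] (fun y => y)).getD 0 with hm
  have hl : (([s1, s2, s3] : List Int).length : Int) = 3 := by simp
  have hr : PySem.List.pyRange 0 (3 : Int) 1 = [0, 1, 2] := by decide
  have hR : List.range 3 = [0, 1, 2] := by decide
  rw [hl, hr, hR]
  by_cases h1 : s1 = m <;> by_cases h2 : s2 = m <;> by_cases h3 : s3 = m <;>
    simp [List.filter, PySem.List.pyGetD, List.getD, h1, h2, h3]

-- B's bucket-then-count score of pattern p equals the reference cycled-match count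
theorem bscore (p : List Int) (hp : p.length ∣ 40) (answers : List Int) :
    ((List.range 40).map
      (fun r => (PySem.List.count
        (((PySem.List.enumerate answers 0).foldl
          (fun (g : List (List Int)) (ia : Int × Int) =>
            let r := (PySem.Int.mod ia.1 40).toNat
            g.set r (g.getD r [] ++ [ia.2]))
          (List.replicate 40 ([] : List Int))).getD r []) (p.getD (r % p.length) 0) : Int))).sum
    = cnt p 0 answers := by
  have h := score_loop p hp answers 0 (List.replicate 40 ([] : List Int)) (by simp)
  rw [score_empty p] at h
  simpa [score] using h

-- ===== VERDICT (by name: the statement is the Claim_ definition above) =====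
theorem solution_spec : Claim_equal_solution := by
  intro answers _
  unfold Spec_solution solution solution_alt
  simp only [List.foldl_cons, List.foldl_nil, List.nil_append, List.cons_append, List.map_cons,
    List.map_nil]
  simp only [checkA, bscore [1,2,3,4,5] (by decide) answers,
    bscore [2,1,2,3,2,4,2,5] (by decide) answers,
    bscore [3,3,1,1,2,2,4,4,5,5] (by decide) answers]
  exact final_eq _ _ _
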